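-- pv_equiv track=rewrite | github.com/JCvLeeuwen/Ijoid_phylogenetic_inference | tone_splitting.py | should_split
-- ===== SOURCE A (Python) =====
-- def should_split(members, tones, clusters, min_size=2):
--     from collections import Counter
--     n_with_tones = len([p for p in tones if p])
--
--     if n_with_tones < 3:
--         return 'keep'
--
--     cluster_counts = Counter(clusters)
--     n_clusters = len(cluster_counts)
--
--     if n_clusters == 1:
--         return 'keep'
--     if n_clusters == n_with_tones:
--         return 'keep'
--
--     valid = [c for c, count in cluster_counts.items() if count >= min_size]
--     if 2 <= len(valid) <= 3:
--         return 'split'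
--     return 'review'
-- ===== SOURCE B (Python) =====
-- def should_split(members, tones, clusters, min_size=2):
--     n_with_tones = len([p for p in tones if p])
--
--     if n_with_tones < 3:
--         return 'keep'
--
--     # sort-based group counting instead of a Counter: sizes of runs of equal labels
--     s = sorted(clusters)
--     sizes = []
--     i = 0
--     n = len(s)
--     while i < n:
--         j = i + 1
--         while j < n and s[j] == s[i]:
--             j += 1
--         sizes.append(j - i)
--         i = j
--
--     n_clusters = len(sizes)
--     if n_clusters == 1:
--         return 'keep'
--     if n_clusters == n_with_tones:
--         return 'keep'
--
--     valid = [c for c in sizes if c >= min_size]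
--     if 2 <= len(valid) <= 3:
--         return 'split'
--     return 'review'
-- ===== Notes on version B (the rewrite author's own statement) =====
-- stated objective: alternative
-- what changed: Replaces the Counter hash-count with a sort-then-single-pass run-length walk (two-index while loop) whose run sizes drive the same threshold logic.
import Mathlib
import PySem

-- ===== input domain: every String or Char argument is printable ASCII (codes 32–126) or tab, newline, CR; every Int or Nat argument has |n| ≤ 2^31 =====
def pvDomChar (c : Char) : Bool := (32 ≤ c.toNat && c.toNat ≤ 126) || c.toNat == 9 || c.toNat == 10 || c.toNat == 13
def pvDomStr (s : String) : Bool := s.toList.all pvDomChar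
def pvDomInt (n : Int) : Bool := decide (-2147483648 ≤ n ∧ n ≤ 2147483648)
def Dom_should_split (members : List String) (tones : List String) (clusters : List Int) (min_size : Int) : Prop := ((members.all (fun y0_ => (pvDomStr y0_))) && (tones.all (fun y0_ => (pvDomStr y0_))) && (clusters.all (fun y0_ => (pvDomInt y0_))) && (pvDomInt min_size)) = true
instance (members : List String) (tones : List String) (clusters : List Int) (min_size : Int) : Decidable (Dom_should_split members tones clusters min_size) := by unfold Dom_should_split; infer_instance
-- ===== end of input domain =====

-- B replaces A's Counter with a sort-then-single-pass run-length walk (alternative decomposition, same cost class).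

-- ===== PORT A =====
def should_split (members : List String) (tones : List String) (clusters : List Int) (min_size : Int) : String :=
  let n_with_tones : Int := ((tones.filter (fun p => !(p == ""))).length : Int)
  if n_with_tones < 3 then "keep"
  else
    let cluster_counts : PySem.Dict Int Int := PySem.Dict.counter clusters
    let n_clusters : Int := (cluster_counts.size : Int)
    if n_clusters = 1 then "keep"
    else if n_clusters = n_with_tones then "keep"
    else
      let valid : List Int := (cluster_counts.items.filter (fun p => decide (min_size ≤ p.2))).map (fun p => p.1)
      if 2 ≤ (valid.length : Int) ∧ (valid.length : Int) ≤ 3 then "split" else "review"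

-- ===== PORT B =====
-- the two-index while walk of Source B: the inner `while s[j] == s[i]` scan is the takeWhile
-- prefix of the run, the outer loop resumes at the dropWhile suffix (exact transliteration)
def runSizes : List Int → List Int
  | [] => []
  | x :: t =>
      (1 + ((t.takeWhile (fun y => y == x)).length : Int)) ::
        runSizes (t.dropWhile (fun y => y == x))
  termination_by s => s.length
  decreasing_by
    have := List.length_dropWhile_le (fun y => y == x) t
    simp only [List.length_cons]
    omega

def should_split_alt (members : List String) (tones : List String) (clusters : List Int) (min_size : Int) : String :=
  let n_with_tones : Int := ((tones.filter (fun p => !(p == ""))).length : Int)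
  if n_with_tones < 3 then "keep"
  else
    let sizes : List Int := runSizes (PySem.List.sorted clusters (fun x => x) false)
    let n_clusters : Int := (sizes.length : Int)
    if n_clusters = 1 then "keep"
    else if n_clusters = n_with_tones then "keep"
    else
      let valid : List Int := sizes.filter (fun c => decide (min_size ≤ c))
      if 2 ≤ (valid.length : Int) ∧ (valid.length : Int) ≤ 3 then "split" else "review"

-- ===== PRECONDITION & SPEC =====
def Spec_should_split (members : List String) (tones : List String) (clusters : List Int) (min_size : Int) (out : String) : Prop := out = should_split_alt members tones clusters min_size
instance (members : List String) (tones : List String) (clusters : List Int) (min_size : Int) (out : String) : Decidable (Spec_should_split members tones clusters min_size out) := by unfold Spec_should_split; infer_instance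

-- ===== CLAIM (what is proved, stated in full; the proofs are below) =====
def Claim_equal_should_split : Prop := ∀ (members : List String) (tones : List String) (clusters : List Int) (min_size : Int), Dom_should_split members tones clusters min_size → Spec_should_split members tones clusters min_size (should_split members tones clusters min_size)

-- ===== LEMMAS AND PROOFS =====

-- the head of a dropWhile suffix falsifies the predicate
theorem dropWhile_head_false {α : Type} (p : α → Bool) :
    ∀ (l : List α) (c : α) (r' : List α), l.dropWhile p = c :: r' → p c = false := by
  intro l
  induction l with
  | nil => intro c r' h; simp [List.dropWhile] at h
  | cons a l ih =>
    intro c r' h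
    rw [List.dropWhile_cons] at h
    split at h
    · exact ih _ _ h
    · rename_i hp
      cases h
      simpa using hp

-- run sizes of an ordered list are (as a multiset) the per-label counts over its distinct labels
theorem runSizes_perm : ∀ (ys : List Int), ys.Pairwise (· ≤ ·) →
    (runSizes ys).Perm ((PySem.Set.ofList ys).map (fun k => (ys.count k : Int))) := by
  intro ys
  induction ys using runSizes.induct with
  | case1 =>
    intro _
    have h0 : PySem.Set.ofList ([] : List Int) = [] := rfl
    simp [runSizes, h0]
  | case2 x t ih =>
    intro h
    have hx : ∀ y ∈ t, x ≤ y := (List.pairwise_cons.mp h).1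
    have ht2 : t.Pairwise (· ≤ ·) := (List.pairwise_cons.mp h).2
    set a := t.takeWhile (fun y => y == x) with ha
    set r := t.dropWhile (fun y => y == x) with hr
    have htar : a ++ r = t := List.takeWhile_append_dropWhile
    have hrsub : List.Sublist r t := by rw [hr]; apply List.dropWhile_sublist
    have hrp : r.Pairwise (· ≤ ·) := ht2.sublist hrsub
    have hxa : ∀ y ∈ a, y = x := by
      intro y hy
      have hby := List.mem_takeWhile_imp (ha ▸ hy)
      simpa using hby
    have hxr : x ∉ r := by
      intro hmem
      cases hq : r with
      | nil => rw [hq] at hmem; simp at hmem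
      | cons c r' =>
        have hc : ((c == x) : Bool) = false := dropWhile_head_false _ t c r' (by rw [← hr, hq])
        have hcx : c ≠ x := by simpa using hc
        have hct : c ∈ t := hrsub.mem (by rw [hq]; exact List.mem_cons_self)
        have hxc : x ≤ c := hx c hct
        rw [hq] at hmem
        rcases List.mem_cons.mp hmem with h1 | h2
        · exact hcx h1.symm
        · have hcle : c ≤ x := (List.pairwise_cons.mp (hq ▸ hrp)).1 x h2
          exact hcx (le_antisymm hcle hxc)
    have hcount_x : (x :: t).count x = 1 + a.length := by
      have hra : r.count x = 0 := List.count_eq_zero.mpr hxr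
      have haa : a.count x = a.length := List.count_eq_length.mpr (fun b hb => (hxa b hb).symm)
      rw [List.count_cons_self, ← htar, List.count_append, haa, hra]
      omega
    have hcount_ne : ∀ k, k ∈ r → (x :: t).count k = r.count k := by
      intro k hk
      have hknx : k ≠ x := fun he => hxr (he ▸ hk)
      have hka : a.count k = 0 := List.count_eq_zero.mpr (fun hka => hknx (hxa k hka))
      have h1 : List.count k (x :: t) = List.count k t := by
        simp [List.count_cons]
        exact fun he => hknx he.symm
      rw [h1, ← htar, List.count_append, hka]
      omega
    have hnodupr : (x :: PySem.Set.ofList r).Nodup := by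
      refine List.nodup_cons.mpr ⟨?_, PySem.Set.nodup_ofList _⟩
      intro hmem
      exact hxr (by simpa [PySem.Set.mem_ofList] using hmem)
    have hofperm : (PySem.Set.ofList (x :: t)).Perm (x :: PySem.Set.ofList r) := by
      rw [List.perm_ext_iff_of_nodup (PySem.Set.nodup_ofList _) hnodupr]
      intro k
      simp only [PySem.Set.mem_ofList, List.mem_cons]
      constructor
      · rintro (rfl | hk)
        · exact Or.inl rfl
        · rw [← htar] at hk
          rcases List.mem_append.mp hk with h1 | h2
          · exact Or.inl (hxa k h1)
          · exact Or.inr (by simpa [PySem.Set.mem_ofList] using h2)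
      · rintro (rfl | hk)
        · exact Or.inl rfl
        · have hkr : k ∈ r := by simpa [PySem.Set.mem_ofList] using hk
          refine Or.inr ?_
          rw [← htar]
          exact List.mem_append.mpr (Or.inr hkr)
    have hih := ih hrp
    have step1 : runSizes (x :: t) = (1 + (a.length : Int)) :: runSizes r := by
      rw [runSizes, ← ha, ← hr]
    have heq : (x :: PySem.Set.ofList r).map (fun k => (((x :: t).count k : Int)))
        = (1 + (a.length : Int)) :: (PySem.Set.ofList r).map (fun k => ((r.count k : Int))) := by
      rw [List.map_cons]
      congr 1
      · rw [hcount_x]; push_cast; ring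
      · apply List.map_congr_left
        intro k hk
        rw [hcount_ne k (by simpa [PySem.Set.mem_ofList] using hk)]
    have hmapperm := hofperm.map (fun k => (((x :: t).count k : Int)))
    have hlast : ((1 + (a.length : Int)) :: (PySem.Set.ofList r).map (fun k => ((r.count k : Int)))).Perm
        ((PySem.Set.ofList (x :: t)).map (fun k => (((x :: t).count k : Int)))) := by
      rw [← heq]
      exact hmapperm.symm
    rw [step1]
    exact (hih.cons _).trans hlast

-- bridge to an arbitrary list through sorting
theorem runSizes_sorted_perm (clusters : List Int) :
    (runSizes (PySem.List.sorted clusters (fun x => x) false)).Perm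
      ((PySem.Set.ofList clusters).map (fun k => (clusters.count k : Int))) := by
  have hp : (PySem.List.sorted clusters (fun x => x) false).Pairwise (· ≤ ·) := by
    simpa using PySem.List.sorted_pairwise (xs := clusters) (key := fun x => x)
  have h1 := runSizes_perm _ hp
  have hperm0 : (PySem.List.sorted clusters (fun x => x) false).Perm clusters :=
    PySem.List.sorted_perm clusters (fun x => x) false
  have hof : (PySem.Set.ofList (PySem.List.sorted clusters (fun x => x) false)).Perm
      (PySem.Set.ofList clusters) := by
    rw [List.perm_ext_iff_of_nodup (PySem.Set.nodup_ofList _) (PySem.Set.nodup_ofList _)]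
    intro k
    simp [PySem.Set.mem_ofList, PySem.List.mem_sorted]
  have heq : (PySem.Set.ofList (PySem.List.sorted clusters (fun x => x) false)).map
        (fun k => (((PySem.List.sorted clusters (fun x => x) false).count k : Int)))
      = (PySem.Set.ofList (PySem.List.sorted clusters (fun x => x) false)).map
        (fun k => ((clusters.count k : Int))) := by
    apply List.map_congr_left
    intro k _
    rw [hperm0.count_eq]
  exact h1.trans ((List.Perm.of_eq heq).trans (hof.map _))

-- ===== VERDICT (by name: the statement is the Claim_ definition above) =====
theorem should_split_spec : Claim_equal_should_split := by
  intro members tones clusters min_size _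
  have key := runSizes_sorted_perm clusters
  have hN : (PySem.Dict.counter (xs := clusters)).size
      = (runSizes (PySem.List.sorted clusters (fun x => x) false)).length := by
    rw [key.length_eq, List.length_map]
    simp only [PySem.Dict.size, PySem.Dict.items_counter, List.length_map]
  have hV : (((PySem.Dict.counter (xs := clusters)).items.filter
          (fun p => decide (min_size ≤ p.2))).map (fun p => p.1)).length
      = ((runSizes (PySem.List.sorted clusters (fun x => x) false)).filter
          (fun c => decide (min_size ≤ c))).length := by
    rw [List.length_map, PySem.Dict.items_counter,
      (key.filter (fun c => decide (min_size ≤ c))).length_eq]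
    simp [List.filter_map, Function.comp_def]
  simp only [Spec_should_split, should_split, should_split_alt]
  rw [hN, hV]
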